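-- pv_equiv track=rewrite | github.com/pypi-data/pypi-mirror-278 | packages/gnida/gnida-0.0.18.tar.gz/gnida-0.0.18/src/gnida/c/64.py | transfer_students
-- ===== SOURCE A (Python) =====
-- class CircularList:
--     def __init__(self):
--         self.items = []
--
--     def add(self, item):
--         self.items.append(item)
--
--     def __len__(self):
--         return len(self.items)
--
--     def __getitem__(self, index):
--         if not self.items:
--             raise IndexError("CircularList is empty")
--         return self.items[index % len(self.items)]
--
--     def __str__(self):
--         return str(self.items)
--
--     def get_kth_elements(self, k, count):
--         result = []
--         index = k
--         for _ in range(count):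
--             result.append(self.items.pop(index % len(self.items)))
--             if len(self.items) == 0:
--                 break
--             index += k - 1
--         return result
--
-- def transfer_students(group1, group2, n, k):
--     group1_list = CircularList()
--     group2_list = CircularList()
--
--     for student in group1:
--         group1_list.add(student)
--
--     for student in group2:
--         group2_list.add(student)
--
--     students_to_transfer = group1_list.get_kth_elements(k, n)
--
--     for student in students_to_transfer:
--         group2_list.add(student)
--
--     new_group1 = list(group1_list.items)
--     new_group2 = list(group2_list.items)
--
--     return new_group1, new_group2
-- ===== SOURCE B (Python) =====
-- def _build(vals, lo, hi):
--     # counted binary tree over vals[lo:hi]; node = [alive_count, left, right], leaf = [alive, None, value]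
--     if hi - lo == 1:
--         return [1, None, vals[lo]]
--     mid = (lo + hi) // 2
--     left = _build(vals, lo, mid)
--     right = _build(vals, mid, hi)
--     return [left[0] + right[0], left, right]
--
-- def _delete(node, p):
--     # remove the p-th (0-based) alive element, returning its value
--     while node[1] is not None:
--         node[0] -= 1
--         left = node[1]
--         if p < left[0]:
--             node = left
--         else:
--             p -= left[0]
--             node = node[2]
--     node[0] = 0
--     return node[2]
--
-- def _alive(node, out):
--     if node[1] is None:
--         if node[0]:
--             out.append(node[2])
--     elif node[0]:
--         _alive(node[1], out)
--         _alive(node[2], out)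
--
-- def transfer_students(group1, group2, n, k):
--     taken = []
--     remaining = len(group1)
--     if n > 0 and remaining > 0:
--         tree = _build(group1, 0, remaining)
--         index = k
--         for _ in range(n):
--             p = index % remaining
--             taken.append(_delete(tree, p))
--             remaining -= 1
--             if remaining == 0:
--                 break
--             index += k - 1
--         new_group1 = []
--         _alive(tree, new_group1)
--     else:
--         new_group1 = list(group1)
--     return new_group1, group2 + taken
-- ===== Notes on version B (the rewrite author's own statement) =====
-- stated objective: faster
-- what changed: Replaces the CircularList with repeated list.pop at a computed position (O(m) per removal) by a counted binary tree over group1 with O(log m) find-kth-and-delete, collecting the survivors in one final traversal; the transferred block is appended to group2 in one concatenation.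
import Mathlib
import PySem

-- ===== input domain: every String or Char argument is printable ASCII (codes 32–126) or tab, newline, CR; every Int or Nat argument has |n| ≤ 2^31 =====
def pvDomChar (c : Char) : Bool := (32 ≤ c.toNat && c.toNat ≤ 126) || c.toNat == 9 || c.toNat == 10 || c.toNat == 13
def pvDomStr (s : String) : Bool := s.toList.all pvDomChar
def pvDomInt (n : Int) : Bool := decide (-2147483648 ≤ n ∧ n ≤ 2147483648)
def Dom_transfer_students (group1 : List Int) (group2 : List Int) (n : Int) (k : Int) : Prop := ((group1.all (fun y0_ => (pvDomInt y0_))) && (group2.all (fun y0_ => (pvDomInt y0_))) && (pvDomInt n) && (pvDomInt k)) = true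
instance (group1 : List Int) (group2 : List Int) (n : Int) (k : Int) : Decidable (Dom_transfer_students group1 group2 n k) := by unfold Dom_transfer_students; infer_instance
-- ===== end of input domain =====

-- B replaces the CircularList's repeated list.pop(p) (O(m) per removal) by a counted
-- binary tree with O(log m) find-kth-and-delete (objective: faster).
-- ===== PORT A =====
-- the loop of CircularList.get_kth_elements: state (items, index, result)
def aGo (k : Int) : Nat → List Int → Int → List Int → List Int × List Int
  | 0, items, _, res => (items, res)
  | c+1, items, index, res =>
    match PySem.Int.mod? index ((items.length : Nat) : Int) with
    | none => (items, res)      -- ZeroDivisionError (items empty); excluded by Pre_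
    | some p =>
      match PySem.List.pop? items p with
      | none => (items, res)    -- unreachable: 0 ≤ p < items.length
      | some (x, rest) =>
        if rest.length = 0 then (rest, res ++ [x])
        else aGo k c rest (index + k - 1) (res ++ [x])

def transfer_students (group1 : List Int) (group2 : List Int) (n : Int) (k : Int) : List Int × List Int :=
  let g1 := group1.foldl (fun acc s => acc ++ [s]) []          -- for student in group1: group1_list.add(student)
  let g2 := group2.foldl (fun acc s => acc ++ [s]) []          -- for student in group2: group2_list.add(student)
  let r := aGo k n.toNat g1 k []                               -- get_kth_elements(k, n)
  let g2' := r.2.foldl (fun acc s => acc ++ [s]) g2            -- for student in students_to_transfer: group2_list.add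
  (r.1, g2')

-- ===== PORT B =====
-- counted binary tree: leaf (alive count 0/1, value) / node (alive count, children)
inductive PvTree where
  | leaf : Nat → Int → PvTree
  | node : Nat → PvTree → PvTree → PvTree
deriving DecidableEq, Repr

def pvCnt : PvTree → Nat
  | .leaf c _ => c
  | .node c _ _ => c

-- _build(vals, lo, hi), given here the sublist vals[lo:hi] (Source B splits at the midpoint)
def pvBuild : List Int → PvTree
  | [] => .leaf 0 0                       -- never called on an empty slice
  | [v] => .leaf 1 v
  | v0 :: v1 :: vs =>
    let l := v0 :: v1 :: vs
    let lt := pvBuild (l.take (l.length / 2))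
    let rt := pvBuild (l.drop (l.length / 2))
    .node (pvCnt lt + pvCnt rt) lt rt
termination_by xs => xs.length
decreasing_by
  · simp [List.length_take]; omega
  · simp [List.length_drop]; omega

-- _delete(node, p): Source B mutates in place walking down; here the updated tree is returned
def pvDelete : PvTree → Nat → Int × PvTree
  | .leaf _ v, _ => (v, .leaf 0 v)
  | .node c l r, p =>
    if p < pvCnt l then
      let s := pvDelete l p
      (s.1, .node (c - 1) s.2 r)
    else
      let s := pvDelete r (p - pvCnt l)
      (s.1, .node (c - 1) l s.2)

-- _alive(node, out): collect the surviving values in order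
def pvAlive : PvTree → List Int
  | .leaf c v => if c ≠ 0 then [v] else []
  | .node c l r => if c ≠ 0 then pvAlive l ++ pvAlive r else []

-- the transfer loop: state (tree, remaining, index, taken)
def bGo (k : Int) : Nat → PvTree → Nat → Int → List Int → PvTree × List Int
  | 0, t, _, _, taken => (t, taken)
  | c+1, t, remaining, index, taken =>
    -- p = index % remaining; remaining > 0 whenever this is reached (loop breaks at 0), so mod is exact
    let p := (PySem.Int.mod index (remaining : Int)).toNat
    let s := pvDelete t p
    if remaining - 1 = 0 then (s.2, taken ++ [s.1])
    else bGo k c s.2 (remaining - 1) (index + k - 1) (taken ++ [s.1])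

def transfer_students_alt (group1 : List Int) (group2 : List Int) (n : Int) (k : Int) : List Int × List Int :=
  if 0 < n ∧ 0 < group1.length then
    let res := bGo k n.toNat (pvBuild group1) group1.length k []
    (pvAlive res.1, group2 ++ res.2)
  else
    (group1, group2 ++ [])

-- ===== PRECONDITION & SPEC =====
-- Pre_ excludes exactly the inputs where A raises ZeroDivisionError (empty group1 with n > 0); B returns the groups unchanged there.
def Pre_transfer_students (group1 : List Int) (group2 : List Int) (n : Int) (k : Int) : Prop :=
  group1 ≠ [] ∨ n ≤ 0
instance (group1 : List Int) (group2 : List Int) (n : Int) (k : Int) : Decidable (Pre_transfer_students group1 group2 n k) := by unfold Pre_transfer_students; infer_instance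

def pvWitness_transfer_students : List Int × List Int × Int × Int := ([3, 1, 4, 1, 5], [9, 2], 3, 2)

def Spec_transfer_students (group1 : List Int) (group2 : List Int) (n : Int) (k : Int) (out : List Int × List Int) : Prop := out = transfer_students_alt group1 group2 n k
instance (group1 : List Int) (group2 : List Int) (n : Int) (k : Int) (out : List Int × List Int) : Decidable (Spec_transfer_students group1 group2 n k out) := by unfold Spec_transfer_students; infer_instance

-- ===== CLAIM (what is proved, stated in full; the proofs are below) =====
def Claim_equal_transfer_students : Prop := ∀ (group1 : List Int) (group2 : List Int) (n : Int) (k : Int), Dom_transfer_students group1 group2 n k → Pre_transfer_students group1 group2 n k → Spec_transfer_students group1 group2 n k (transfer_students group1 group2 n k)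
-- ===== LEMMAS AND PROOFS =====

-- well-formedness: every stored count is the number of surviving values below the node
def pvWF : PvTree → Prop
  | .leaf c _ => c ≤ 1
  | .node c l r => c = pvCnt l + pvCnt r ∧ pvWF l ∧ pvWF r

theorem pvCnt_eq_alive_length (t : PvTree) (h : pvWF t) : pvCnt t = (pvAlive t).length := by
  induction t with
  | leaf c v =>
    simp only [pvWF] at h
    interval_cases c <;> simp [pvAlive, pvCnt]
  | node c l r ihl ihr =>
    obtain ⟨hc, hl, hr⟩ := h
    simp only [pvCnt, pvAlive]
    split
    · simp [hc, ihl hl, ihr hr]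
    · rename_i h0
      simp at h0
      simp [h0]

theorem pvBuild_WF (vs : List Int) : pvWF (pvBuild vs) := by
  induction vs using pvBuild.induct with
  | case1 => rw [pvBuild]; exact Nat.zero_le 1
  | case2 v => rw [pvBuild]; exact Nat.le_refl 1
  | case3 v0 v1 vs l ihl ihr => rw [pvBuild]; exact ⟨rfl, ihl, ihr⟩

theorem pvBuild_alive (vs : List Int) (h : vs ≠ []) : pvAlive (pvBuild vs) = vs := by
  induction vs using pvBuild.induct with
  | case1 => simp at h
  | case2 v => simp [pvBuild, pvAlive]
  | case3 v0 v1 vs l ihl ihr =>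
    have hl2 : l.length = vs.length + 2 := rfl
    have hlt := ihl (by simp [List.take_eq_nil_iff, hl2])
    have hrt := ihr (by simp [List.drop_eq_nil_iff, hl2]; omega)
    have hcpos : pvCnt (pvBuild (List.take (l.length / 2) l)) + pvCnt (pvBuild (List.drop (l.length / 2) l)) ≠ 0 := by
      rw [pvCnt_eq_alive_length _ (pvBuild_WF _), hlt, pvCnt_eq_alive_length _ (pvBuild_WF _), hrt]
      simp [List.length_take, List.length_drop, hl2]
    rw [pvBuild]
    show pvAlive (.node _ _ _) = _
    rw [pvAlive, if_pos hcpos, hlt, hrt, List.take_append_drop]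

theorem pvDelete_spec (t : PvTree) (p : Nat) (hwf : pvWF t) (hp : p < (pvAlive t).length) :
    (pvDelete t p).1 = (pvAlive t)[p] ∧
    pvAlive (pvDelete t p).2 = (pvAlive t).eraseIdx p ∧
    pvWF (pvDelete t p).2 := by
  induction t generalizing p with
  | leaf c v =>
    simp only [pvWF] at hwf
    have hc : c ≠ 0 := by intro h0; simp [pvAlive, h0] at hp
    have hc1 : c = 1 := by omega
    subst hc1
    simp [pvAlive] at hp ⊢
    have hp0 : p = 0 := by omega
    subst hp0
    simp [pvDelete, pvAlive, pvWF]
  | node c l r ihl ihr =>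
    obtain ⟨hc, hl, hr⟩ := hwf
    have hcl : pvCnt l = (pvAlive l).length := pvCnt_eq_alive_length l hl
    have hcr : pvCnt r = (pvAlive r).length := pvCnt_eq_alive_length r hr
    have hcne : c ≠ 0 := by
      intro h0
      rw [pvAlive, if_neg (by simp [h0])] at hp
      simp at hp
    have hAll : pvAlive (PvTree.node c l r) = pvAlive l ++ pvAlive r := by
      rw [pvAlive, if_pos hcne]
    rw [hAll] at hp
    simp only [List.length_append] at hp
    simp only [pvDelete]
    by_cases hside : p < pvCnt l
    · obtain ⟨e1, e2, e3⟩ := ihl p hl (by omega)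
      have hcl' : pvCnt (pvDelete l p).2 = (pvAlive l).length - 1 := by
        rw [pvCnt_eq_alive_length _ e3, e2, List.length_eraseIdx_of_lt (by omega)]
      rw [if_pos hside]
      refine ⟨?_, ?_, ?_⟩
      · rw [List.getElem_of_eq hAll, e1, List.getElem_append_left (by omega)]
      · rw [hAll]
        simp only [pvAlive]
        by_cases hz : c - 1 = 0
        · rw [if_neg (by simpa using hz)]
          have h2 : (pvAlive r).length = 0 := by omega
          rw [List.eraseIdx_append_of_lt_length (by omega)]
          rw [List.length_eq_zero_iff.mp h2]
          have he : (pvAlive l).eraseIdx p = [] := by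
            apply List.eq_nil_of_length_eq_zero
            rw [List.length_eraseIdx_of_lt (by omega)]
            omega
          simp [he]
        · rw [if_pos (by simpa using hz), e2,
            List.eraseIdx_append_of_lt_length (by omega)]
      · exact ⟨by omega, e3, hr⟩
    · obtain ⟨e1, e2, e3⟩ := ihr (p - pvCnt l) hr (by omega)
      have hcr' : pvCnt (pvDelete r (p - pvCnt l)).2 = (pvAlive r).length - 1 := by
        rw [pvCnt_eq_alive_length _ e3, e2, List.length_eraseIdx_of_lt (by omega)]
      rw [if_neg hside]
      refine ⟨?_, ?_, ?_⟩
      · rw [List.getElem_of_eq hAll, e1, List.getElem_append_right (by omega)]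
        congr 1
        omega
      · rw [hAll]
        simp only [pvAlive]
        by_cases hz : c - 1 = 0
        · rw [if_neg (by simpa using hz)]
          have h1 : (pvAlive l).length = 0 := by omega
          rw [List.length_eq_zero_iff.mp h1]
          have he : (pvAlive r).eraseIdx (p - pvCnt l) = [] := by
            apply List.eq_nil_of_length_eq_zero
            rw [List.length_eraseIdx_of_lt (by omega)]
            omega
          simp only [List.nil_append]
          have hpp : p - pvCnt l = p := by omega
          rw [← hpp]
          exact he.symm
        · rw [if_pos (by simpa using hz), e2,
            List.eraseIdx_append_of_length_le (by omega)]
          congr 2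
          omega
      · exact ⟨by omega, hl, e3⟩

theorem bGo_eq_aGo (k : Int) (c : Nat) : ∀ (t : PvTree) (items : List Int) (index : Int) (taken : List Int),
    pvWF t → pvAlive t = items → 0 < items.length →
    pvAlive (bGo k c t items.length index taken).1 = (aGo k c items index taken).1 ∧
    (bGo k c t items.length index taken).2 = (aGo k c items index taken).2 := by
  induction c with
  | zero => intro t items index taken hwf hal hpos; subst hal; simp [bGo, aGo]
  | succ c ih =>
    intro t items index taken hwf hal hpos
    subst hal
    have hmne : (((pvAlive t).length : Nat) : Int) ≠ 0 := by exact_mod_cast Nat.pos_iff_ne_zero.mp hpos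
    have hmpos : (0 : Int) < (((pvAlive t).length : Nat) : Int) := by exact_mod_cast hpos
    set p := PySem.Int.mod index (((pvAlive t).length : Nat) : Int) with hpdef
    have hmod : PySem.Int.mod? index (((pvAlive t).length : Nat) : Int) = some p := by
      simp only [PySem.Int.mod?, PySem.Int.mod, hpdef]
      rw [if_neg hmne]
    have hp0 : 0 ≤ p := PySem.Int.mod_nonneg index hmpos
    have hplt : p < (((pvAlive t).length : Nat) : Int) := PySem.Int.mod_lt index hmpos
    have hpn : p.toNat < (pvAlive t).length := by omega
    obtain ⟨e1, e2, e3⟩ := pvDelete_spec t p.toNat hwf hpn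
    have hpcast : p = ((p.toNat : Nat) : Int) := by omega
    have hpop : PySem.List.pop? (pvAlive t) p
        = some ((pvAlive t)[p.toNat]'hpn, (pvAlive t).eraseIdx p.toNat) := by
      conv_lhs => rw [hpcast]
      exact PySem.List.pop?_natCast _ _ hpn
    have hrestlen : ((pvAlive t).eraseIdx p.toNat).length = (pvAlive t).length - 1 :=
      List.length_eraseIdx_of_lt hpn
    simp only [bGo, aGo, hmod, hpop]
    rw [hrestlen]
    by_cases hz : (pvAlive t).length - 1 = 0
    · simp [hz, ← hpdef, e1, e2]
    · simp only [hz, ← hpdef, e1]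
      have := ih (pvDelete t p.toNat).2 ((pvAlive t).eraseIdx p.toNat) (index + k - 1)
        (taken ++ [(pvAlive t)[p.toNat]'hpn]) e3 e2 (by omega)
      rw [hrestlen] at this
      exact this

-- ===== VERDICT (by name: the statement is the Claim_ definition above) =====
theorem transfer_students_spec : Claim_equal_transfer_students := by
  intro g1 g2 n k _ hpre
  unfold Spec_transfer_students transfer_students transfer_students_alt
  simp only [PySem.List.foldl_append_singleton, List.nil_append]
  by_cases hn : 0 < n ∧ 0 < g1.length
  · rw [if_pos hn]
    obtain ⟨h1, h2⟩ := bGo_eq_aGo k n.toNat (pvBuild g1) g1 k []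
      (pvBuild_WF g1) (pvBuild_alive g1 (by intro h; subst h; simp at hn)) hn.2
    rw [h1, h2]
  · rw [if_neg hn]
    have hn0 : n.toNat = 0 := by
      rcases hpre with h | h
      · rcases Nat.eq_zero_or_pos g1.length with hz | hz
        · exact absurd (List.length_eq_zero_iff.mp hz) h
        · have hn' : ¬ 0 < n := fun hpos => hn ⟨hpos, hz⟩
          omega
      · omega
    simp [hn0, aGo]
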